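-- pv_equiv track=rewrite | github.com/S-Christensen/cartographersStudy | backend/scoringCards.py | heartoftheForest
-- ===== SOURCE A (Python) =====
-- def is_surrounded_by_Forest_or_edge(grid, r, c):
--     rows = len(grid)
--     cols = len(grid[0])
--     surroundings = [
--         (r - 1, c),  # above
--         (r + 1, c),  # below
--         (r, c - 1),  # left
--         (r, c + 1)  # right
--     ]
--
--     for nr, nc in surroundings:
--         if 0 <= nr < rows and 0 <= nc < cols:
--             if grid[nr][nc] != "Forest":
--                 return False
--         else:  # Out of bounds, considered as edge of the map
--             continue
--     return True
--
-- def heartoftheForest(grid):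
--     count = 0
--     for r in range(len(grid)):
--         for c in range(len(grid[0])):
--             if grid[r][c] == "Forest":
--                 if is_surrounded_by_Forest_or_edge(grid, r, c):
--                     count += 1
--     return count*2
-- ===== SOURCE B (Python) =====
-- def heartoftheForest(grid):
--     rows = len(grid)
--     if rows == 0:
--         return 0
--     cols = len(grid[0])
--     forests = {(r, c) for r in range(rows) for c in range(cols)
--                if grid[r][c] == "Forest"}
--     disq = set()
--     for r in range(rows):
--         for c in range(cols):
--             if (r, c) not in forests:
--                 for nb in ((r - 1, c), (r + 1, c), (r, c - 1), (r, c + 1)):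
--                     if nb in forests:
--                         disq.add(nb)
--     return 2 * (len(forests) - len(disq))
-- ===== Notes on version B (the rewrite author's own statement) =====
-- stated objective: alternative
-- what changed: Instead of polling each Forest cell's four neighbours for a non-Forest intruder (A), B builds the set of Forest coordinates in one pass, then scans the non-Forest cells and marks their Forest neighbours as disqualified, returning 2*(|forests| - |disqualified|); Pre_ excludes only the ragged grids (a row shorter than the first) on which A raises IndexError.
import Mathlib
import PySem

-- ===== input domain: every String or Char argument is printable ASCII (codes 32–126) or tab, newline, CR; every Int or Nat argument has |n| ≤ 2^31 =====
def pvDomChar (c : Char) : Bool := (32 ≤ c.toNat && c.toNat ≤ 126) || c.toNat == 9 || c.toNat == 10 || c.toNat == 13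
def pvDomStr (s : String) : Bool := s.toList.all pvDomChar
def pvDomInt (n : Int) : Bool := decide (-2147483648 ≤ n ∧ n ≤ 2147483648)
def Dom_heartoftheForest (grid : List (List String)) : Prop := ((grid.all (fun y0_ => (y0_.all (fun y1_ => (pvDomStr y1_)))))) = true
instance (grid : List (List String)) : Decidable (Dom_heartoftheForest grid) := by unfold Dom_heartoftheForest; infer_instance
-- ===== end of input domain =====

-- B inverts the scan: instead of polling each Forest cell's four neighbours (A), it marks the
-- Forest neighbours of every NON-Forest cell as disqualified and counts the remaining Forest cells.

-- grid[r][c] (both Pythons only index in range on the admitted inputs)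
def pvCell (grid : List (List String)) (r c : Int) : String :=
  PySem.List.pyGetD (PySem.List.pyGetD grid r []) c ""

-- the four orthogonal neighbour coordinates, in the order both Pythons list them
def pvNbrs (p : Int × Int) : List (Int × Int) :=
  [(p.1 - 1, p.2), (p.1 + 1, p.2), (p.1, p.2 - 1), (p.1, p.2 + 1)]

-- ===== PORT A =====
def pvSurrounded (grid : List (List String)) (r c : Int) : Bool :=
  let rows : Int := grid.length
  let cols : Int := (grid.headD []).length
  (pvNbrs (r, c)).all (fun p =>
    if 0 ≤ p.1 ∧ p.1 < rows ∧ 0 ≤ p.2 ∧ p.2 < cols then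
      pvCell grid p.1 p.2 == "Forest"
    else true)

def heartoftheForest (grid : List (List String)) : Int :=
  let count : Int :=
    (PySem.List.pyRange 0 (grid.length : Int) 1).foldl (fun acc r =>
      (PySem.List.pyRange 0 ((grid.headD []).length : Int) 1).foldl (fun acc c =>
        if pvCell grid r c == "Forest" then
          if pvSurrounded grid r c then acc + 1 else acc
        else acc) acc) 0
  count * 2

-- ===== PORT B =====
def heartoftheForest_alt (grid : List (List String)) : Int :=
  let rows : Int := grid.length
  if rows == 0 then 0 else
  let cols : Int := (grid.headD []).length
  let forests : PySem.Set (Int × Int) := PySem.Set.ofList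
    ((PySem.List.pyRange 0 rows 1).flatMap (fun r =>
      (PySem.List.pyRange 0 cols 1).filterMap (fun c =>
        if pvCell grid r c == "Forest" then some (r, c) else none)))
  let disq : PySem.Set (Int × Int) :=
    (PySem.List.pyRange 0 rows 1).foldl (fun s r =>
      (PySem.List.pyRange 0 cols 1).foldl (fun s c =>
        if !(PySem.Set.contains forests (r, c)) then
          (pvNbrs (r, c)).foldl (fun s nb =>
            if PySem.Set.contains forests nb then PySem.Set.add s nb else s) s
        else s) s) PySem.Set.empty
  2 * ((forests.length : Int) - (disq.length : Int))

-- ===== PRECONDITION & SPEC =====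
-- Pre_ excludes exactly the ragged grids on which A raises IndexError: whenever some row is
-- shorter than the first row, A indexes it at a column < len(grid[0]) beyond its length.
def Pre_heartoftheForest (grid : List (List String)) : Prop :=
  ∀ row ∈ grid, (grid.headD []).length ≤ row.length
instance (grid : List (List String)) : Decidable (Pre_heartoftheForest grid) := by
  unfold Pre_heartoftheForest; infer_instance

def pvWitness_heartoftheForest : List (List String) := [["Forest", "X"], ["Forest", "Forest"]]

def Spec_heartoftheForest (grid : List (List String)) (out : Int) : Prop := out = heartoftheForest_alt grid
instance (grid : List (List String)) (out : Int) : Decidable (Spec_heartoftheForest grid out) := by unfold Spec_heartoftheForest; infer_instance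

-- ===== CLAIM (what is proved, stated in full; the proofs are below) =====
def Claim_equal_heartoftheForest : Prop := ∀ (grid : List (List String)), Dom_heartoftheForest grid → Pre_heartoftheForest grid → Spec_heartoftheForest grid (heartoftheForest grid)

-- ===== LEMMAS AND PROOFS =====

-- the list of all in-bounds cell coordinates, in A's scan order
def pvCells (grid : List (List String)) : List (Int × Int) :=
  (PySem.List.pyRange 0 (grid.length : Int) 1).flatMap
    (fun r => (PySem.List.pyRange 0 ((grid.headD []).length : Int) 1).map (Prod.mk r))

def pvIsF (grid : List (List String)) : Int × Int → Bool :=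
  fun p => pvCell grid p.1 p.2 == "Forest"

def pvF (grid : List (List String)) : List (Int × Int) :=
  (pvCells grid).filter (pvIsF grid)

theorem pv_mem_cells (grid : List (List String)) (p : Int × Int) :
    p ∈ pvCells grid ↔
      0 ≤ p.1 ∧ p.1 < (grid.length : Int) ∧ 0 ≤ p.2 ∧ p.2 < ((grid.headD []).length : Int) := by
  obtain ⟨a, b⟩ := p
  have h : pvCells grid =
      (PySem.List.pyRange 0 (grid.length : Int) 1) ×ˢ
      (PySem.List.pyRange 0 ((grid.headD []).length : Int) 1) := rfl
  rw [h, List.mem_product]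
  simp [PySem.List.mem_pyRange_one]
  tauto

theorem pv_nodup_cells (grid : List (List String)) : (pvCells grid).Nodup := by
  have h : pvCells grid =
      (PySem.List.pyRange 0 (grid.length : Int) 1) ×ˢ
      (PySem.List.pyRange 0 ((grid.headD []).length : Int) 1) := rfl
  rw [h]
  exact List.Nodup.product (PySem.List.nodup_pyRange_one _ _) (PySem.List.nodup_pyRange_one _ _)

theorem pv_nbrs_symm (p q : Int × Int) : p ∈ pvNbrs q ↔ q ∈ pvNbrs p := by
  simp [pvNbrs, Prod.ext_iff]; omega

theorem pv_surrounded_iff (grid : List (List String)) (y : Int × Int) :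
    pvSurrounded grid y.1 y.2 = true ↔
      ∀ p ∈ pvNbrs y,
        (0 ≤ p.1 ∧ p.1 < (grid.length : Int) ∧ 0 ≤ p.2 ∧ p.2 < ((grid.headD []).length : Int)) →
        pvIsF grid p = true := by
  simp only [pvSurrounded, pvIsF, List.all_eq_true]
  constructor
  · intro h p hp hb
    have := h p hp
    rwa [if_pos hb] at this
  · intro h p hp
    by_cases hb : 0 ≤ p.1 ∧ p.1 < (grid.length : Int) ∧ 0 ≤ p.2 ∧ p.2 < ((grid.headD []).length : Int)
    · rw [if_pos hb]; exact h p hp hb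
    · rw [if_neg hb]

theorem pv_foldl_count (l : List (Int × Int)) (q s : Int × Int → Bool) :
    ∀ acc : Int,
      l.foldl (fun acc p => if q p then if s p then acc + 1 else acc else acc) acc
        = acc + (l.countP (fun p => q p && s p) : Int) := by
  induction l with
  | nil => simp
  | cons a t ih =>
    intro acc
    simp only [List.foldl_cons, List.countP_cons]
    by_cases hq : q a <;> by_cases hs : s a <;>
      simp [hq, hs, ih] <;> push_cast <;> ring

theorem pv_filterMap_eq (l : List Int) (f : Int → Int × Int) (q : Int × Int → Bool) :
    l.filterMap (fun x => if q (f x) then some (f x) else none) = (l.map f).filter q := by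
  induction l with
  | nil => rfl
  | cons a t ih =>
    simp only [List.filterMap_cons, List.map_cons, List.filter_cons]
    by_cases hq : q (f a) <;> simp [hq, ih]

theorem pv_mem_nbrFold (F : List (Int × Int)) (l : List (Int × Int)) :
    ∀ (s0 : List (Int × Int)) (y : Int × Int),
      y ∈ l.foldl (fun s nb => if PySem.Set.contains F nb then PySem.Set.add s nb else s) s0
        ↔ y ∈ s0 ∨ (y ∈ l ∧ y ∈ F) := by
  induction l with
  | nil => simp
  | cons a t ih =>
    intro s0 y
    simp only [List.foldl_cons]
    by_cases ha : a ∈ F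
    · rw [if_pos ((PySem.Set.contains_iff F a).mpr ha), ih, PySem.Set.mem_add]
      constructor
      · rintro ((h | rfl) | h)
        · exact Or.inl h
        · exact Or.inr ⟨List.mem_cons_self .., ha⟩
        · exact Or.inr ⟨List.mem_cons_of_mem _ h.1, h.2⟩
      · rintro (h | ⟨hm, hF⟩)
        · exact Or.inl (Or.inl h)
        · rcases List.mem_cons.mp hm with rfl | hm
          · exact Or.inl (Or.inr rfl)
          · exact Or.inr ⟨hm, hF⟩
    · rw [if_neg (by simp [PySem.Set.contains_iff, ha]), ih]
      constructor
      · rintro (h | h)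
        · exact Or.inl h
        · exact Or.inr ⟨List.mem_cons_of_mem _ h.1, h.2⟩
      · rintro (h | ⟨hm, hF⟩)
        · exact Or.inl h
        · rcases List.mem_cons.mp hm with rfl | hm
          · exact absurd hF ha
          · exact Or.inr ⟨hm, hF⟩

theorem pv_nodup_nbrFold (F : List (Int × Int)) (l : List (Int × Int)) :
    ∀ s0 : List (Int × Int), s0.Nodup →
      (l.foldl (fun s nb => if PySem.Set.contains F nb then PySem.Set.add s nb else s) s0).Nodup := by
  induction l with
  | nil => intro s0 h; simpa
  | cons a t ih =>
    intro s0 h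
    simp only [List.foldl_cons]
    by_cases hc : PySem.Set.contains F a
    · rw [if_pos hc]; exact ih _ (PySem.Set.nodup_add s0 a h)
    · rw [if_neg hc]; exact ih _ h

theorem pv_mem_cellFold (F : List (Int × Int)) (l : List (Int × Int)) :
    ∀ (s0 : List (Int × Int)) (y : Int × Int),
      y ∈ l.foldl (fun s p => if !(PySem.Set.contains F p) then
            (pvNbrs p).foldl (fun s nb => if PySem.Set.contains F nb then PySem.Set.add s nb else s) s
          else s) s0
        ↔ y ∈ s0 ∨ ∃ p ∈ l, p ∉ F ∧ y ∈ pvNbrs p ∧ y ∈ F := by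
  induction l with
  | nil => simp
  | cons a t ih =>
    intro s0 y
    simp only [List.foldl_cons]
    by_cases ha : a ∈ F
    · rw [if_neg (by simp [PySem.Set.contains_iff, ha]), ih]
      constructor
      · rintro (h | ⟨p, hp, hx⟩)
        · exact Or.inl h
        · exact Or.inr ⟨p, List.mem_cons_of_mem _ hp, hx⟩
      · rintro (h | ⟨p, hp, hnF, hnb, hyF⟩)
        · exact Or.inl h
        · rcases List.mem_cons.mp hp with rfl | hp
          · exact absurd ha hnF
          · exact Or.inr ⟨p, hp, hnF, hnb, hyF⟩
    · rw [if_pos (by simp [PySem.Set.contains_iff, ha]), ih, pv_mem_nbrFold]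
      constructor
      · rintro ((h | ⟨hnb, hyF⟩) | ⟨p, hp, hx⟩)
        · exact Or.inl h
        · exact Or.inr ⟨a, List.mem_cons_self .., ha, hnb, hyF⟩
        · exact Or.inr ⟨p, List.mem_cons_of_mem _ hp, hx⟩
      · rintro (h | ⟨p, hp, hnF, hnb, hyF⟩)
        · exact Or.inl (Or.inl h)
        · rcases List.mem_cons.mp hp with rfl | hp
          · exact Or.inl (Or.inr ⟨hnb, hyF⟩)
          · exact Or.inr ⟨p, hp, hnF, hnb, hyF⟩

theorem pv_nodup_cellFold (F : List (Int × Int)) (l : List (Int × Int)) :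
    ∀ s0 : List (Int × Int), s0.Nodup →
      (l.foldl (fun s p => if !(PySem.Set.contains F p) then
          (pvNbrs p).foldl (fun s nb => if PySem.Set.contains F nb then PySem.Set.add s nb else s) s
        else s) s0).Nodup := by
  induction l with
  | nil => intro s0 h; simpa
  | cons a t ih =>
    intro s0 h
    simp only [List.foldl_cons]
    by_cases hc : !(PySem.Set.contains F a)
    · rw [if_pos hc]; exact ih _ (pv_nodup_nbrFold F _ _ h)
    · rw [if_neg hc]; exact ih _ h

theorem pv_countP_split (l : List (Int × Int)) (q s : Int × Int → Bool) :
    l.countP q = l.countP (fun x => q x && s x) + l.countP (fun x => q x && !s x) := by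
  induction l with
  | nil => simp
  | cons a t ih =>
    by_cases hq : q a <;> by_cases hs : s a <;>
      simp [List.countP_cons, hq, hs, ih] <;> omega

theorem pv_A_val (grid : List (List String)) :
    heartoftheForest grid =
      2 * ((pvCells grid).countP (fun p => pvIsF grid p && pvSurrounded grid p.1 p.2) : Int) := by
  show (_ : Int) * 2 = _
  have h := pv_foldl_count (pvCells grid) (pvIsF grid) (fun p => pvSurrounded grid p.1 p.2) 0
  simp only [pvCells, List.foldl_flatMap, List.foldl_map, pvIsF] at h
  rw [h]
  simp only [pvIsF, pvCells]
  ring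

theorem pv_B_val (grid : List (List String)) (hnil : grid ≠ []) :
    heartoftheForest_alt grid =
      2 * (((pvF grid).length : Int)
            - (((pvF grid).filter (fun y => !pvSurrounded grid y.1 y.2)).length : Int)) := by
  have hlen : grid.length ≠ 0 := by simpa [List.length_eq_zero_iff] using hnil
  have hne : (((grid.length : Int)) == 0) = false := by
    simp only [beq_eq_false_iff_ne, ne_eq, Int.natCast_eq_zero]; exact hlen
  -- the forests list built by B is exactly pvF grid
  have hforest :
      ((PySem.List.pyRange 0 (grid.length : Int) 1).flatMap (fun r =>
        (PySem.List.pyRange 0 ((grid.headD []).length : Int) 1).filterMap (fun c =>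
          if pvCell grid r c == "Forest" then some (r, c) else none))) = pvF grid := by
    have h1 : ∀ r : Int,
        ((PySem.List.pyRange 0 ((grid.headD []).length : Int) 1).filterMap (fun c =>
          if pvCell grid r c == "Forest" then some (r, c) else none))
        = ((PySem.List.pyRange 0 ((grid.headD []).length : Int) 1).map (Prod.mk r)).filter
            (pvIsF grid) := fun r =>
      pv_filterMap_eq (PySem.List.pyRange 0 ((grid.headD []).length : Int) 1) (Prod.mk r)
        (pvIsF grid)
    simp only [h1]
    rw [← List.filter_flatMap]
    rfl
  have hFnodup : (pvF grid).Nodup := (pv_nodup_cells grid).filter _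
  have hofList : PySem.Set.ofList (pvF grid) = pvF grid :=
    PySem.Set.ofList_eq_self_of_nodup _ hFnodup
  -- reduce B to its two let-bound values
  show (if (((grid.length : Int)) == 0) = true then (0 : Int) else _) = _
  rw [if_neg (by rw [hne]; exact Bool.false_ne_true)]
  rw [hforest, hofList]
  -- the nested disq loop is the cell-list fold
  have hd :
      ((PySem.List.pyRange 0 (grid.length : Int) 1).foldl (fun s r =>
        (PySem.List.pyRange 0 ((grid.headD []).length : Int) 1).foldl (fun s c =>
          if !(PySem.Set.contains (pvF grid) (r, c)) then
            (pvNbrs (r, c)).foldl (fun s nb =>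
              if PySem.Set.contains (pvF grid) nb then PySem.Set.add s nb else s) s
          else s) s) PySem.Set.empty)
      = ((pvCells grid).foldl (fun s p =>
          if !(PySem.Set.contains (pvF grid) p) then
            (pvNbrs p).foldl (fun s nb =>
              if PySem.Set.contains (pvF grid) nb then PySem.Set.add s nb else s) s
          else s) PySem.Set.empty) := by
    simp only [pvCells, List.foldl_flatMap, List.foldl_map]
  rw [hd]
  -- disq equals, as a nodup list, the disqualified Forest cells
  have hmem : ∀ y, y ∈ ((pvCells grid).foldl (fun s p =>
      if !(PySem.Set.contains (pvF grid) p) then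
        (pvNbrs p).foldl (fun s nb =>
          if PySem.Set.contains (pvF grid) nb then PySem.Set.add s nb else s) s
      else s) PySem.Set.empty)
      ↔ y ∈ (pvF grid).filter (fun y => !pvSurrounded grid y.1 y.2) := by
    intro y
    rw [pv_mem_cellFold]
    simp only [PySem.Set.empty, List.not_mem_nil, false_or, List.mem_filter,
      Bool.not_eq_true', Bool.not_eq_true]
    constructor
    · rintro ⟨p, hp, hnF, hnb, hyF⟩
      refine ⟨hyF, ?_⟩
      by_contra hs
      have hs' : pvSurrounded grid y.1 y.2 = true := by
        cases h' : pvSurrounded grid y.1 y.2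
        · exact absurd h' hs
        · rfl
      have hb : 0 ≤ p.1 ∧ p.1 < (grid.length : Int) ∧ 0 ≤ p.2 ∧
          p.2 < ((grid.headD []).length : Int) := (pv_mem_cells grid p).mp hp
      have := (pv_surrounded_iff grid y).mp hs' p ((pv_nbrs_symm p y).mpr hnb) hb
      exact hnF (List.mem_filter.mpr ⟨hp, this⟩)
    · rintro ⟨hyF, hs⟩
      have hs' : ¬ (pvSurrounded grid y.1 y.2 = true) := by rw [hs]; exact Bool.false_ne_true
      rw [pv_surrounded_iff] at hs'
      push_neg at hs'
      obtain ⟨p, hnb, hb, hpf⟩ := hs'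
      refine ⟨p, (pv_mem_cells grid p).mpr hb, ?_, (pv_nbrs_symm y p).mpr hnb, hyF⟩
      intro hpF
      exact hpf (List.mem_filter.mp hpF).2
  have hdnodup := pv_nodup_cellFold (pvF grid) (pvCells grid) PySem.Set.empty List.nodup_nil
  have hperm := (List.perm_ext_iff_of_nodup hdnodup (hFnodup.filter _)).mpr hmem
  rw [hperm.length_eq]

theorem heartoftheForest_spec : Claim_equal_heartoftheForest := by
  intro grid _ _
  show heartoftheForest grid = heartoftheForest_alt grid
  by_cases hnil : grid = []
  · subst hnil; rfl
  · rw [pv_A_val, pv_B_val grid hnil]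
    have hsplit := pv_countP_split (pvCells grid) (pvIsF grid)
      (fun p => pvSurrounded grid p.1 p.2)
    have hflen : (pvF grid).length = (pvCells grid).countP (pvIsF grid) := by
      rw [pvF, ← List.countP_eq_length_filter]
    have hfflen : ((pvF grid).filter (fun y => !pvSurrounded grid y.1 y.2)).length
        = (pvCells grid).countP (fun p => pvIsF grid p && !pvSurrounded grid p.1 p.2) := by
      rw [pvF, List.filter_filter, ← List.countP_eq_length_filter]
      exact List.countP_congr (fun p _ => by
        cases pvIsF grid p <;> cases pvSurrounded grid p.1 p.2 <;> rfl)
    rw [hflen, hfflen]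
    rw [hsplit]
    push_cast
    ring
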